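-- pv_equiv track=rewrite | github.com/GiGwebs/danish-radio-explorer | Scripts/prepare_playlist_transfer.py | deduplicate_tracks
-- ===== SOURCE A (Python) =====
-- def deduplicate_tracks(data):
--     """Remove duplicates from the track data in a smart way"""
--     if not data:
--         return []
--
--     # Create a new list for deduplicated tracks
--     deduplicated = []
--     seen = set()  # Keep track of artist-title combinations we've seen
--     seen_titles = {}  # Keep track of titles we've seen for fuzzy matching
--
--     # First pass: collect normalized versions for fuzzy matching
--     for item in data:
--         artist = item.get('Artist', '').strip()
--         title = item.get('Title', '').strip()
--
--         # Skip entirely empty entries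
--         if not artist and not title:
--             continue
--
--         # Normalize title for better duplicate detection
--         norm_title = title.lower()
--         # Remove special characters, extra spaces and common words that might differ
--         for char in ['(', ')', '[', ']', '-', '/', ':', '.', ',']:
--             norm_title = norm_title.replace(char, ' ')
--         norm_title = ' '.join(word for word in norm_title.split()
--                              if word not in ['feat', 'ft', 'featuring', 'remix', 'edit', 'version', 'radio'])
--         norm_title = ' '.join(norm_title.split())  # Remove extra spaces
--
--         # Store normalized version
--         if norm_title:
--             if norm_title in seen_titles:
--                 seen_titles[norm_title].append((artist, title, item))
--             else:
--                 seen_titles[norm_title] = [(artist, title, item)]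
--
--     # Second pass: keep only unique tracks
--     for norm_title, entries in seen_titles.items():
--         # If we have multiple entries with the same normalized title
--         if len(entries) > 1:
--             # Prioritize entries with both artist and title
--             complete_entries = [e for e in entries if e[0] and e[1]]
--             if complete_entries:
--                 # Among complete entries, prefer the first one
--                 artist, title, item = complete_entries[0]
--             else:
--                 # If no complete entries, take the first one
--                 artist, title, item = entries[0]
--         else:
--             # Only one entry with this title
--             artist, title, item = entries[0]
--
--         # Create the unique key for this artist-title combination
--         key = (artist.lower(), norm_title)
--
--         # Only add if we haven't seen this exact artist-title combination
--         if key not in seen: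
--             seen.add(key)
--             deduplicated.append(item)
--
--     # Sort by artist name for nicer presentation
--     deduplicated.sort(key=lambda x: x.get('Artist', '').lower())
--     return deduplicated
-- ===== SOURCE B (Python) =====
-- def deduplicate_tracks(data):
--     """Remove duplicates from track data: one pass keeps, per normalized title,
--     the first complete entry (else the first entry), then sorts by artist."""
--     chosen = {}  # norm_title -> (item, is_complete)
--     for item in data:
--         artist = item.get('Artist', '').strip()
--         title = item.get('Title', '').strip()
--         if not artist and not title:
--             continue
--         # Same normalization as the original
--         norm_title = title.lower()
--         for char in ['(', ')', '[', ']', '-', '/', ':', '.', ',']: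
--             norm_title = norm_title.replace(char, ' ')
--         norm_title = ' '.join(word for word in norm_title.split()
--                               if word not in ['feat', 'ft', 'featuring', 'remix', 'edit', 'version', 'radio'])
--         norm_title = ' '.join(norm_title.split())
--         if not norm_title:
--             continue
--         complete = bool(artist) and bool(title)
--         prev = chosen.get(norm_title)
--         if prev is None:
--             chosen[norm_title] = (item, complete)
--         elif complete and not prev[1]:
--             chosen[norm_title] = (item, True)
--     result = [item for item, _ in chosen.values()]
--     result.sort(key=lambda x: x.get('Artist', '').lower())
--     return result
-- ===== Notes on version B (the rewrite author's own statement) =====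
-- stated objective: alternative
-- what changed: Replaces A's two-pass grouping (build a dict of full per-title entry lists, then rescan every group with a completeness filter and a redundant seen-set) by a single pass that keeps, per normalized title, only the current representative item plus a completeness flag, then sorts; per-title lists and the second pass disappear.
import Mathlib
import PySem

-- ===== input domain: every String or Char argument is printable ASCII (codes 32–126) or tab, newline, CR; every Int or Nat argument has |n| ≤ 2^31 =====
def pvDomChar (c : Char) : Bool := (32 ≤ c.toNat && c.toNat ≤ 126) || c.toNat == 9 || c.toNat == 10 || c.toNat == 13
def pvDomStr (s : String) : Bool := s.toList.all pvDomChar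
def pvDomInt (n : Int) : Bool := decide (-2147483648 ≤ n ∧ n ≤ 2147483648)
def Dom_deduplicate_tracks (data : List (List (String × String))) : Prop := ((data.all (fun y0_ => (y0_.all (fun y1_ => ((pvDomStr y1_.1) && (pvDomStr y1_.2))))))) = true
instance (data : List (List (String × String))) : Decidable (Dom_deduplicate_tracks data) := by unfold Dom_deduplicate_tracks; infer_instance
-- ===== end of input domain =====

-- B replaces A's two-pass grouping (per-title entry lists, then a rescan with a filter and a
-- seen-set) by a single pass keeping one representative item + completeness flag per title.

-- shared helper: item.get(k, dflt) on a Python dict modelled as an association list (first match)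
def pvDictGet (item : List (String × String)) (k dflt : String) : String :=
  match item.find? (fun p => p.1 == k) with
  | some p => p.2
  | none => dflt

-- shared helper: the normalization block both Pythons contain verbatim
def pvNormTitle (title : String) : String :=
  let n0 := PySem.Str.lower title
  let n1 := ["(", ")", "[", "]", "-", "/", ":", ".", ","].foldl
              (fun s c => PySem.Str.replace s c " ") n0
  let n2 := PySem.Str.join " " ((PySem.Str.split₀ n1).filter
              (fun w => !(["feat", "ft", "featuring", "remix", "edit", "version", "radio"].contains w)))
  PySem.Str.join " " (PySem.Str.split₀ n2)

-- ===== PORT A =====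
def deduplicate_tracks (data : List (List (String × String))) : List (List (String × String)) :=
  if data = [] then []
  else
    -- first pass: seen_titles[norm_title] = list of (artist, title, item)
    let seen_titles : PySem.Dict String (List (String × String × List (String × String))) :=
      data.foldl (fun st item =>
        let artist := PySem.Str.strip (pvDictGet item "Artist" "")
        let title := PySem.Str.strip (pvDictGet item "Title" "")
        if artist = "" ∧ title = "" then st
        else
          let norm_title := pvNormTitle title
          if norm_title = "" then st
          else if st.contains norm_title then st.modify norm_title [] (· ++ [(artist, title, item)])
          else st.insert norm_title [(artist, title, item)]) PySem.Dict.empty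
    -- second pass over seen_titles.items()
    let acc := seen_titles.items.foldl
      (fun (acc : PySem.Set (String × String) × List (List (String × String))) p =>
        let norm_title := p.1
        let entries := p.2
        let e :=
          if entries.length > 1 then
            let complete_entries := entries.filter (fun e => !(e.1 == "") && !(e.2.1 == ""))
            if complete_entries ≠ [] then PySem.List.pyGetD complete_entries 0 ("", "", [])
            else PySem.List.pyGetD entries 0 ("", "", [])
          else PySem.List.pyGetD entries 0 ("", "", [])
        let key := (PySem.Str.lower e.1, norm_title)
        if acc.1.contains key then acc
        else (PySem.Set.add acc.1 key, acc.2 ++ [e.2.2])) (PySem.Set.empty, [])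
    PySem.List.sorted acc.2 (fun x => PySem.Str.lower (pvDictGet x "Artist" "")) false

-- ===== PORT B =====
def deduplicate_tracks_alt (data : List (List (String × String))) : List (List (String × String)) :=
  let chosen : PySem.Dict String (List (String × String) × Bool) :=
    data.foldl (fun ch item =>
      let artist := PySem.Str.strip (pvDictGet item "Artist" "")
      let title := PySem.Str.strip (pvDictGet item "Title" "")
      if artist = "" ∧ title = "" then ch
      else
        let norm_title := pvNormTitle title
        if norm_title = "" then ch
        else
          let complete := !(artist == "") && !(title == "")
          match ch.get? norm_title with
          | none => ch.insert norm_title (item, complete)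
          | some prev => if complete && !prev.2 then ch.insert norm_title (item, true) else ch)
      PySem.Dict.empty
  let result := chosen.values.map (·.1)
  PySem.List.sorted result (fun x => PySem.Str.lower (pvDictGet x "Artist" "")) false

-- ===== PRECONDITION & SPEC =====
def Spec_deduplicate_tracks (data : List (List (String × String))) (out : List (List (String × String))) : Prop := out = deduplicate_tracks_alt data
instance (data : List (List (String × String))) (out : List (List (String × String))) : Decidable (Spec_deduplicate_tracks data out) := by unfold Spec_deduplicate_tracks; infer_instance

-- ===== CLAIM (what is proved, stated in full; the proofs are below) =====
def Claim_equal_deduplicate_tracks : Prop := ∀ (data : List (List (String × String))), Dom_deduplicate_tracks data → Spec_deduplicate_tracks data (deduplicate_tracks data)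

-- ===== LEMMAS AND PROOFS =====

-- proof-side abbreviations (never used by the ports)
def pvCmpl (e : String × String × List (String × String)) : Bool := !(e.1 == "") && !(e.2.1 == "")

-- the representative A's second pass picks from a group, and whether it is complete
def pvSelT (es : List (String × String × List (String × String))) : String × String × List (String × String) :=
  match es.filter pvCmpl with
  | c :: _ => c
  | [] => es.headD ("", "", [])

def pvFlag (es : List (String × String × List (String × String))) : Bool :=
  !(es.filter pvCmpl).isEmpty

def pvG (p : String × List (String × String × List (String × String))) :
    String × (List (String × String) × Bool) :=
  (p.1, ((pvSelT p.2).2.2, pvFlag p.2))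

-- the three loop bodies, named (definitionally equal to the lambdas in the ports)
def pvStepA (st : PySem.Dict String (List (String × String × List (String × String))))
    (item : List (String × String)) :
    PySem.Dict String (List (String × String × List (String × String))) :=
  let artist := PySem.Str.strip (pvDictGet item "Artist" "")
  let title := PySem.Str.strip (pvDictGet item "Title" "")
  if artist = "" ∧ title = "" then st
  else
    let norm_title := pvNormTitle title
    if norm_title = "" then st
    else if st.contains norm_title then st.modify norm_title [] (· ++ [(artist, title, item)])
    else st.insert norm_title [(artist, title, item)]

def pvStepB (ch : PySem.Dict String (List (String × String) × Bool))
    (item : List (String × String)) : PySem.Dict String (List (String × String) × Bool) :=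
  let artist := PySem.Str.strip (pvDictGet item "Artist" "")
  let title := PySem.Str.strip (pvDictGet item "Title" "")
  if artist = "" ∧ title = "" then ch
  else
    let norm_title := pvNormTitle title
    if norm_title = "" then ch
    else
      let complete := !(artist == "") && !(title == "")
      match ch.get? norm_title with
      | none => ch.insert norm_title (item, complete)
      | some prev => if complete && !prev.2 then ch.insert norm_title (item, true) else ch

def pvStepC (acc : PySem.Set (String × String) × List (List (String × String)))
    (p : String × List (String × String × List (String × String))) :
    PySem.Set (String × String) × List (List (String × String)) :=
  let norm_title := p.1
  let entries := p.2
  let e :=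
    if entries.length > 1 then
      let complete_entries := entries.filter (fun e => !(e.1 == "") && !(e.2.1 == ""))
      if complete_entries ≠ [] then PySem.List.pyGetD complete_entries 0 ("", "", [])
      else PySem.List.pyGetD entries 0 ("", "", [])
    else PySem.List.pyGetD entries 0 ("", "", [])
  let key := (PySem.Str.lower e.1, norm_title)
  if acc.1.contains key then acc
  else (PySem.Set.add acc.1 key, acc.2 ++ [e.2.2])

-- restatements of the ports through the named steps
theorem portA_eq (data : List (List (String × String))) (h : ¬ data = []) :
    deduplicate_tracks data =
      PySem.List.sorted
        (((data.foldl pvStepA PySem.Dict.empty).items.foldl pvStepC (PySem.Set.empty, [])).2)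
        (fun x => PySem.Str.lower (pvDictGet x "Artist" "")) false := by
  simp only [deduplicate_tracks, if_neg h]
  rfl

theorem portB_eq (data : List (List (String × String))) :
    deduplicate_tracks_alt data =
      PySem.List.sorted
        (((data.foldl pvStepB PySem.Dict.empty).values.map (·.1)))
        (fun x => PySem.Str.lower (pvDictGet x "Artist" "")) false := by
  rfl

-- selection lemmas
theorem pvFlag_false_iff (es : List (String × String × List (String × String))) :
    pvFlag es = false ↔ es.filter pvCmpl = [] := by
  simp [pvFlag, List.isEmpty_iff]

theorem pvSelT_append_of_flag (es : List (String × String × List (String × String)))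
    (e : String × String × List (String × String)) (h : pvFlag es = true) :
    pvSelT (es ++ [e]) = pvSelT es ∧ pvFlag (es ++ [e]) = true := by
  have h' : es.filter pvCmpl ≠ [] := fun hnil => by simp [pvFlag, hnil] at h
  obtain ⟨c, t, hc⟩ := List.exists_cons_of_ne_nil h'
  have hfa : (es ++ [e]).filter pvCmpl = c :: (t ++ [e].filter pvCmpl) := by
    rw [List.filter_append, hc]; rfl
  constructor
  · simp only [pvSelT, hfa, hc]
  · simp [pvFlag, hfa]

theorem pvSelT_append_of_not_cmpl (es : List (String × String × List (String × String)))
    (e : String × String × List (String × String)) (hne : es ≠ [])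
    (hf : pvFlag es = false) (hc : pvCmpl e = false) :
    pvSelT (es ++ [e]) = pvSelT es ∧ pvFlag (es ++ [e]) = false := by
  rw [pvFlag_false_iff] at hf
  have hfa : (es ++ [e]).filter pvCmpl = [] := by
    rw [List.filter_append, hf]; simp [List.filter, hc]
  obtain ⟨x, xs, rfl⟩ := List.exists_cons_of_ne_nil hne
  constructor
  · simp only [pvSelT, hfa, hf]
    rfl
  · exact (pvFlag_false_iff _).mpr hfa

theorem pvSelT_append_of_cmpl (es : List (String × String × List (String × String)))
    (e : String × String × List (String × String))
    (hf : pvFlag es = false) (hc : pvCmpl e = true) :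
    pvSelT (es ++ [e]) = e ∧ pvFlag (es ++ [e]) = true := by
  rw [pvFlag_false_iff] at hf
  have hfa : (es ++ [e]).filter pvCmpl = [e] := by
    rw [List.filter_append, hf]; simp [List.filter, hc]
  constructor
  · simp only [pvSelT, hfa]
  · simp [pvFlag, hfa]

theorem pvG_single (k : String) (e : String × String × List (String × String)) :
    pvG (k, [e]) = (k, (e.2.2, pvCmpl e)) := by
  cases h : pvCmpl e <;> simp [pvG, pvSelT, pvFlag, List.filter, h]

-- A's literal pick equals pvSelT on a nonempty group
theorem pick_eq (es : List (String × String × List (String × String))) (hne : es ≠ []) :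
    (if es.length > 1 then
        let complete_entries := es.filter (fun e => !(e.1 == "") && !(e.2.1 == ""))
        if complete_entries ≠ [] then PySem.List.pyGetD complete_entries 0 ("", "", [])
        else PySem.List.pyGetD es 0 ("", "", [])
      else PySem.List.pyGetD es 0 ("", "", [])) = pvSelT es := by
  obtain ⟨x, xs, rfl⟩ := List.exists_cons_of_ne_nil hne
  dsimp only
  by_cases hlen : (x :: xs).length > 1
  · rw [if_pos hlen]
    by_cases hf : List.filter (fun e => !(e.1 == "") && !(e.2.1 == "")) (x :: xs) = []
    · rw [if_neg (by simpa using hf), PySem.List.pyGetD_zero_cons]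
      have hf2 : List.filter pvCmpl (x :: xs) = [] := hf
      simp only [pvSelT, hf2]
      rfl
    · obtain ⟨c, t, hc⟩ := List.exists_cons_of_ne_nil hf
      rw [if_pos (by simpa using hf), hc, PySem.List.pyGetD_zero_cons]
      have hc2 : List.filter pvCmpl (x :: xs) = c :: t := hc
      simp only [pvSelT, hc2]
  · rw [if_neg hlen]
    have hxs : xs = [] := by
      cases xs with
      | nil => rfl
      | cons y ys => simp at hlen
    subst hxs
    cases h : pvCmpl x <;>
      simp [pvSelT, List.filter, h, PySem.List.pyGetD_zero_cons]

-- under Nodup keys, the entry with a given key is unique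
theorem pvItems_unique {ν : Type} (st : PySem.Dict String ν) (hnd : st.keys.Nodup)
    {k : String} {v : ν} (hm : (k, v) ∈ st.items) (q : String × ν) (hq : q ∈ st.items)
    (hk : q.1 = k) : q = (k, v) := by
  have h1 := PySem.Dict.get?_of_mem_items st hm hnd
  have h2 : st.get? k = some q.2 := by
    apply PySem.Dict.get?_of_mem_items st _ hnd
    rw [← hk]; exact hq
  rw [h1] at h2
  obtain ⟨q1, q2⟩ := q
  simp_all

theorem pvKeys_eq (st : PySem.Dict String (List (String × String × List (String × String))))
    (ch : PySem.Dict String (List (String × String) × Bool))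
    (h : ch.items = st.items.map pvG) : ch.keys = st.keys := by
  simp only [PySem.Dict.keys, h, List.map_map]
  exact List.map_congr_left (fun p _ => rfl)

-- one step of the main invariant
theorem pvStep_inv (st : PySem.Dict String (List (String × String × List (String × String))))
    (ch : PySem.Dict String (List (String × String) × Bool))
    (item : List (String × String))
    (h : ch.items = st.items.map pvG) (hnd : st.keys.Nodup)
    (hne : ∀ p ∈ st.items, p.2 ≠ []) :
    (pvStepB ch item).items = (pvStepA st item).items.map pvG ∧
      (pvStepA st item).keys.Nodup ∧ (∀ p ∈ (pvStepA st item).items, p.2 ≠ []) := by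
  have hkeys : ch.keys = st.keys := pvKeys_eq st ch h
  simp only [pvStepA, pvStepB]
  by_cases h1 : PySem.Str.strip (pvDictGet item "Artist" "") = "" ∧
      PySem.Str.strip (pvDictGet item "Title" "") = ""
  · rw [if_pos h1, if_pos h1]; exact ⟨h, hnd, hne⟩
  · rw [if_neg h1, if_neg h1]
    by_cases h2 : pvNormTitle (PySem.Str.strip (pvDictGet item "Title" "")) = ""
    · rw [if_pos h2, if_pos h2]; exact ⟨h, hnd, hne⟩
    · rw [if_neg h2, if_neg h2]
      -- abbreviations
      let artist := PySem.Str.strip (pvDictGet item "Artist" "")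
      let title := PySem.Str.strip (pvDictGet item "Title" "")
      let nt := pvNormTitle title
      let e : String × String × List (String × String) := (artist, title, item)
      show (match ch.get? nt with
            | none => ch.insert nt (item, !(artist == "") && !(title == ""))
            | some prev => if (!(artist == "") && !(title == "")) && !prev.2 then
                ch.insert nt (item, true) else ch).items =
          (if st.contains nt then st.modify nt [] (· ++ [e]) else st.insert nt [e]).items.map pvG ∧ _ ∧ _
      have hcompl : (!(artist == "") && !(title == "")) = pvCmpl e := rfl
      by_cases h3 : st.contains nt = true
      · -- the key is already present: A appends to the group, B may replace its representative
        obtain ⟨es, hmem⟩ : ∃ x, (nt, x) ∈ st.items := by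
          simpa [PySem.Dict.keys] using (PySem.Dict.contains_iff_mem_keys st nt).mp h3
        have hesne : es ≠ [] := hne _ hmem
        have hgetD : st.getD nt [] = es := PySem.Dict.getD_of_mem_items st hmem hnd []
        have hmod : st.modify nt [] (· ++ [e]) = st.insert nt (es ++ [e]) := by
          show st.insert nt (st.getD nt [] ++ [e]) = _
          rw [hgetD]
        have hAitems : (st.modify nt [] (· ++ [e])).items =
            st.items.map (fun p => if (p.1 == nt) = true then (nt, es ++ [e]) else p) := by
          rw [hmod]; exact PySem.Dict.items_insert_of_contains st _ h3
        have hchnd : ch.keys.Nodup := hkeys ▸ hnd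
        have hget : ch.get? nt = some ((pvSelT es).2.2, pvFlag es) := by
          apply PySem.Dict.get?_of_mem_items ch _ hchnd
          rw [h]
          exact List.mem_map.mpr ⟨(nt, es), hmem, rfl⟩
        rw [if_pos h3]
        have huniq : ∀ q ∈ st.items, (q.1 == nt) = true → q = (nt, es) := by
          intro q hq hq1
          exact pvItems_unique st hnd hmem q hq (by simpa using hq1)
        have hnodup' : (st.modify nt [] (· ++ [e])).keys.Nodup := by
          rw [hmod]; exact PySem.Dict.nodup_keys_insert st nt _ hnd
        have hne' : ∀ p ∈ (st.modify nt [] (· ++ [e])).items, p.2 ≠ [] := by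
          rw [hAitems]
          intro p hp
          obtain ⟨q, hq, rfl⟩ := List.mem_map.mp hp
          by_cases hq1 : (q.1 == nt) = true
          · simp only [hq1, if_pos]; simp
          · simp only [hq1]; simp only [if_neg, Bool.false_eq_true, not_false_iff]
            exact hne q hq
        refine ⟨?_, hnodup', hne'⟩
        simp only [hget]
        by_cases h4 : (pvCmpl e && !pvFlag es) = true
        · -- B replaces: the stored representative is incomplete and the new entry is complete
          obtain ⟨hce, hfe⟩ := Bool.and_eq_true_iff.mp h4
          have hfe' : pvFlag es = false := by simpa using hfe
          have hsel := pvSelT_append_of_cmpl es e hfe' hce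
          rw [hcompl, if_pos h4]
          have hchc : ch.contains nt = true := by
            rw [PySem.Dict.contains_iff_mem_keys, hkeys]
            exact (PySem.Dict.contains_iff_mem_keys st nt).mp h3
          rw [PySem.Dict.items_insert_of_contains ch _ hchc, h, hAitems, List.map_map, List.map_map]
          apply List.map_congr_left
          intro q hq
          by_cases hq1 : (q.1 == nt) = true
          · have := huniq q hq hq1
            subst this
            simp only [Function.comp, pvG, hq1, if_pos, hsel.1, hsel.2]
            rfl
          · simp only [Function.comp, pvG, hq1, Bool.false_eq_true, if_false]
        · -- B keeps its representative; A's append does not change the selection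
          have hkeep : pvSelT (es ++ [e]) = pvSelT es ∧ pvFlag (es ++ [e]) = pvFlag es := by
            by_cases hf : pvFlag es = true
            · have := pvSelT_append_of_flag es e hf
              exact ⟨this.1, by rw [this.2, hf]⟩
            · have hf' : pvFlag es = false := by simpa using hf
              have hc' : pvCmpl e = false := by
                cases hcp : pvCmpl e with
                | false => rfl
                | true => exact absurd (by simp [hcp, hf']) h4
              have := pvSelT_append_of_not_cmpl es e hesne hf' hc'
              exact ⟨this.1, by rw [this.2, hf']⟩
          rw [hcompl, if_neg (by simpa using h4)]
          rw [h, hAitems, List.map_map]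
          apply List.map_congr_left
          intro q hq
          by_cases hq1 : (q.1 == nt) = true
          · have := huniq q hq hq1
            subst this
            simp only [Function.comp, pvG, hq1, if_pos, hkeep.1, hkeep.2]
          · simp only [Function.comp, pvG, hq1, Bool.false_eq_true, if_false]
      · -- fresh key: both sides append a new entry
        have h3' : st.contains nt = false := by simpa using h3
        rw [if_neg h3]
        have hnone : ch.get? nt = none := by
          rw [PySem.Dict.get?_eq_none_iff_not_mem_keys, hkeys]
          intro hmemk
          exact h3 ((PySem.Dict.contains_iff_mem_keys st nt).mpr hmemk)
        have hchc : ch.contains nt = false := by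
          rw [Bool.eq_false_iff]
          intro hc
          rw [PySem.Dict.contains_iff_mem_keys, hkeys] at hc
          exact h3 ((PySem.Dict.contains_iff_mem_keys st nt).mpr hc)
        simp only [hnone]
        refine ⟨?_, PySem.Dict.nodup_keys_insert st nt _ hnd, ?_⟩
        · rw [PySem.Dict.items_insert_of_not_contains ch _ hchc,
            PySem.Dict.items_insert_of_not_contains st _ h3', List.map_append, h]
          congr 1
          simp only [List.map_cons, List.map_nil, pvG_single]
          rfl
        · rw [PySem.Dict.items_insert_of_not_contains st _ h3']
          intro p hp
          rcases List.mem_append.mp hp with hp | hp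
          · exact hne p hp
          · simp only [List.mem_singleton] at hp
            subst hp
            simp

-- the main invariant over the whole list
theorem pvFold_inv (data : List (List (String × String))) :
    ∀ (st : PySem.Dict String (List (String × String × List (String × String))))
      (ch : PySem.Dict String (List (String × String) × Bool)),
      ch.items = st.items.map pvG → st.keys.Nodup → (∀ p ∈ st.items, p.2 ≠ []) →
      (data.foldl pvStepB ch).items = (data.foldl pvStepA st).items.map pvG ∧
        (data.foldl pvStepA st).keys.Nodup ∧
        (∀ p ∈ (data.foldl pvStepA st).items, p.2 ≠ []) := by
  induction data with
  | nil => exact fun st ch h hnd hne => ⟨h, hnd, hne⟩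
  | cons item rest ih =>
    intro st ch h hnd hne
    obtain ⟨h', hnd', hne'⟩ := pvStep_inv st ch item h hnd hne
    exact ih _ _ h' hnd' hne'

-- the second pass appends exactly the selected items, in order
theorem pvPass2 (l : List (String × List (String × String × List (String × String)))) :
    ∀ (seen : PySem.Set (String × String)) (acc : List (List (String × String))),
      (∀ p ∈ l, (PySem.Str.lower (pvSelT p.2).1, p.1) ∉ seen) →
      (l.map (·.1)).Nodup → (∀ p ∈ l, p.2 ≠ []) →
      (l.foldl pvStepC (seen, acc)).2 = acc ++ l.map (fun p => (pvSelT p.2).2.2) := by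
  induction l with
  | nil => intro seen acc _ _ _; simp
  | cons p rest ih =>
    intro seen acc hseen hnd hne
    simp only [List.map_cons, List.nodup_cons] at hnd
    obtain ⟨hnotin, hndr⟩ := hnd
    have hpe : p.2 ≠ [] := hne p (by simp)
    have hkey : seen.contains (PySem.Str.lower (pvSelT p.2).1, p.1) = false := by
      have hmem := hseen p (by simp)
      exact Bool.eq_false_iff.mpr (fun hcon => hmem ((PySem.Set.contains_iff _ _).mp hcon))
    have hstep : pvStepC (seen, acc) p =
        (PySem.Set.add seen (PySem.Str.lower (pvSelT p.2).1, p.1),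
          acc ++ [(pvSelT p.2).2.2]) := by
      simp only [pvStepC, pick_eq p.2 hpe, hkey]
      simp
    rw [List.foldl_cons, hstep, ih _ _ ?_ hndr ?_]
    · simp
    · intro q hq hmem
      rw [PySem.Set.mem_add] at hmem
      rcases hmem with hmem | hmem
      · exact hseen q (by simp [hq]) hmem
      · have hq1 : q.1 = p.1 := congrArg Prod.snd hmem
        exact hnotin (hq1 ▸ List.mem_map_of_mem hq)
    · exact fun q hq => hne q (by simp [hq])

theorem deduplicate_tracks_spec : Claim_equal_deduplicate_tracks := by
  unfold Claim_equal_deduplicate_tracks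
  intro data _
  unfold Spec_deduplicate_tracks
  by_cases hd : data = []
  · subst hd; rfl
  · rw [portA_eq data hd, portB_eq data]
    obtain ⟨hitems, hnd, hne⟩ := pvFold_inv data PySem.Dict.empty PySem.Dict.empty rfl
      (by simp [PySem.Dict.keys, PySem.Dict.empty]) (by simp [PySem.Dict.empty])
    have hB : ((data.foldl pvStepB PySem.Dict.empty).values.map (·.1)) =
        (data.foldl pvStepA PySem.Dict.empty).items.map (fun p => (pvSelT p.2).2.2) := by
      simp only [PySem.Dict.values, hitems, List.map_map]
      exact List.map_congr_left (fun p _ => rfl)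
    have hA : (((data.foldl pvStepA PySem.Dict.empty).items.foldl pvStepC (PySem.Set.empty, [])).2) =
        [] ++ (data.foldl pvStepA PySem.Dict.empty).items.map (fun p => (pvSelT p.2).2.2) := by
      apply pvPass2
      · intro p _ hmem
        exact absurd hmem (List.not_mem_nil)
      · simpa [PySem.Dict.keys] using hnd
      · exact hne
    rw [hA, hB]
    simp
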